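-- pv_equiv track=rewrite | github.com/StaticFDP/staticfdp | scripts/issues_to_datasets.py | match_gaps_to_disease
-- ===== SOURCE A (Python) =====
-- def match_gaps_to_disease(gap_issues: list[dict],
--                            disease_ids: list[tuple],
--                            disease_name: str) -> list[dict]:
--     """Return gap issues that mention this disease by ID or name."""
--     disease_iris = {iri for _, _, iri, _ in disease_ids}
--     name_lower   = disease_name.lower()
--     matched = []
--     for issue in gap_issues:
--         body = (issue.get("body") or "").lower()
--         title = (issue.get("title") or "").lower()
--         if name_lower and (name_lower in body or name_lower in title):
--             matched.append(issue)
--             continue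
--         for _, local, _, _ in disease_ids:
--             if local in body or local in title:
--                 matched.append(issue)
--                 break
--     return matched
-- ===== SOURCE B (Python) =====
-- def match_gaps_to_disease(gap_issues: list[dict],
--                           disease_ids: list[tuple],
--                           disease_name: str) -> list[dict]:
--     """Return gap issues that mention this disease by ID or name."""
--     name_lower = disease_name.lower()
--     patterns = ([name_lower] if name_lower else []) + [local for _, local, _, _ in disease_ids]
--     # minimal pattern set: drop every pattern that already contains a kept one
--     kept = []
--     for p in patterns:
--         if not any(q in p for q in kept):
--             kept.append(p)
--
--     def hits(issue):
--         body = (issue.get("body") or "").lower()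
--         title = (issue.get("title") or "").lower()
--         return any(q in body or q in title for q in kept)
--
--     return [issue for issue in gap_issues if hits(issue)]
-- ===== Notes on version B (the rewrite author's own statement) =====
-- stated objective: alternative
-- what changed: B precomputes once a minimal pattern set (disease name plus local IDs, dropping duplicates and any pattern that contains an already-kept pattern as a substring) and then filters issues with a single any-pass over that set, instead of A's per-issue two-stage check (name first, then a break-loop over all disease IDs).
import Mathlib
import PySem

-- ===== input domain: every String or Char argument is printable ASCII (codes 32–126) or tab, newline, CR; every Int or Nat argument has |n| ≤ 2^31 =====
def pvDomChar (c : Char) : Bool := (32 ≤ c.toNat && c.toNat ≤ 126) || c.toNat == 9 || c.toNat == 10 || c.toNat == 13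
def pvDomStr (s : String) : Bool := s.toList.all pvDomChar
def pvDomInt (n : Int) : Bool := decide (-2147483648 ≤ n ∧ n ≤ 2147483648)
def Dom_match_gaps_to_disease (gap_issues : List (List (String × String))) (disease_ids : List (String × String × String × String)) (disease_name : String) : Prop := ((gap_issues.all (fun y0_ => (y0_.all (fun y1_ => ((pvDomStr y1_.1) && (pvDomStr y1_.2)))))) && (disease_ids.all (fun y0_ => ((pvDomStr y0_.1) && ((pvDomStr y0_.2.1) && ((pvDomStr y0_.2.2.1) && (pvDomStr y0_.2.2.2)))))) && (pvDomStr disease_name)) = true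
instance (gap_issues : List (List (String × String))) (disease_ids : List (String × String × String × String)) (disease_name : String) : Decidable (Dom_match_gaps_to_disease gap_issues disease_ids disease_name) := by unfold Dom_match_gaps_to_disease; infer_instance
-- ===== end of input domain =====

-- B replaces A's per-issue two-stage pattern checks by one filter over a pattern set
-- pruned once of duplicates/superstrings (objective: alternative; no speed claim).

-- ===== PORT A =====
def match_gaps_to_disease (gap_issues : List (List (String × String))) (disease_ids : List (String × String × String × String)) (disease_name : String) : List (List (String × String)) :=
  let _disease_iris := PySem.Set.ofList (disease_ids.map (fun t => t.2.2.1))  -- computed and unused, as in A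
  let name_lower := PySem.Str.lower disease_name
  gap_issues.foldl (fun matched issue =>
    let body := PySem.Str.lower (PySem.Dict.getD (PySem.Dict.mk issue) "body" "")
    let title := PySem.Str.lower (PySem.Dict.getD (PySem.Dict.mk issue) "title" "")
    if (!name_lower.toList.isEmpty) && (PySem.Str.isIn name_lower body || PySem.Str.isIn name_lower title) then
      matched ++ [issue]
    else if disease_ids.any (fun t => PySem.Str.isIn t.2.1 body || PySem.Str.isIn t.2.1 title) then
      -- inner 'for … if …: append; break' appends the issue once iff some local matches
      matched ++ [issue]
    else matched) []

-- ===== PORT B =====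
def match_gaps_to_disease_alt (gap_issues : List (List (String × String))) (disease_ids : List (String × String × String × String)) (disease_name : String) : List (List (String × String)) :=
  let name_lower := PySem.Str.lower disease_name
  let patterns := (if name_lower.toList.isEmpty then [] else [name_lower]) ++ disease_ids.map (fun t => t.2.1)
  let kept := patterns.foldl (fun kept p => if kept.any (fun q => PySem.Str.isIn q p) then kept else kept ++ [p]) ([] : List String)
  gap_issues.filter (fun issue =>
    let body := PySem.Str.lower (PySem.Dict.getD (PySem.Dict.mk issue) "body" "")
    let title := PySem.Str.lower (PySem.Dict.getD (PySem.Dict.mk issue) "title" "")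
    kept.any (fun q => PySem.Str.isIn q body || PySem.Str.isIn q title))

-- ===== PRECONDITION & SPEC =====
def Spec_match_gaps_to_disease (gap_issues : List (List (String × String))) (disease_ids : List (String × String × String × String)) (disease_name : String) (out : List (List (String × String))) : Prop := out = match_gaps_to_disease_alt gap_issues disease_ids disease_name
instance (gap_issues : List (List (String × String))) (disease_ids : List (String × String × String × String)) (disease_name : String) (out : List (List (String × String))) : Decidable (Spec_match_gaps_to_disease gap_issues disease_ids disease_name out) := by unfold Spec_match_gaps_to_disease; infer_instance

-- ===== CLAIM (what is proved, stated in full; the proofs are below) =====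
def Claim_equal_match_gaps_to_disease : Prop := ∀ (gap_issues : List (List (String × String))) (disease_ids : List (String × String × String × String)) (disease_name : String), Dom_match_gaps_to_disease gap_issues disease_ids disease_name → Spec_match_gaps_to_disease gap_issues disease_ids disease_name (match_gaps_to_disease gap_issues disease_ids disease_name)

-- ===== LEMMAS AND PROOFS =====

-- substring containment is transitive
theorem isIn_trans (q p s : String) (h1 : PySem.Str.isIn q p = true)
    (h2 : PySem.Str.isIn p s = true) : PySem.Str.isIn q s = true := by
  rw [PySem.Str.isIn_iff_infix] at *
  exact h1.trans h2

-- a hit on lowered body/title is monotone under the substring order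
theorem hit_mono (b t : String) (q p : String) (hqp : PySem.Str.isIn q p = true)
    (hp : (PySem.Str.isIn p b || PySem.Str.isIn p t) = true) :
    (PySem.Str.isIn q b || PySem.Str.isIn q t) = true := by
  simp only [Bool.or_eq_true] at hp ⊢
  rcases hp with h | h
  · exact Or.inl (isIn_trans q p b hqp h)
  · exact Or.inr (isIn_trans q p t hqp h)

-- B's pruning loop preserves the truth of any substring-monotone predicate
theorem prune_any (f : String → Bool)
    (hmono : ∀ q p, PySem.Str.isIn q p = true → f p = true → f q = true) :
    ∀ (pats kept : List String),
      (pats.foldl (fun kept p => if kept.any (fun q => PySem.Str.isIn q p) then kept else kept ++ [p]) kept).any f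
        = (kept.any f || pats.any f) := by
  intro pats
  induction pats with
  | nil => intro kept; simp
  | cons p rest ih =>
    intro kept
    simp only [List.foldl_cons, List.any_cons]
    by_cases hc : kept.any (fun q => PySem.Str.isIn q p) = true
    · rw [if_pos hc, ih]
      by_cases hfp : f p = true
      · obtain ⟨q, hq, hqp⟩ := List.any_eq_true.mp hc
        have hkf : kept.any f = true := List.any_eq_true.mpr ⟨q, hq, hmono q p hqp hfp⟩
        simp [hkf]
      · simp [Bool.eq_false_iff.mpr hfp]
    · rw [if_neg hc, ih]
      simp [List.any_append, Bool.or_assoc]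

-- B's whole pattern pipeline tests f like A's two-stage check does
theorem patterns_any (f : String → Bool)
    (hmono : ∀ q p, PySem.Str.isIn q p = true → f p = true → f q = true)
    (nl : String) (ids : List (String × String × String × String)) :
    (((if nl.toList.isEmpty then ([] : List String) else [nl]) ++ ids.map (fun t => t.2.1)).foldl
        (fun kept p => if kept.any (fun q => PySem.Str.isIn q p) then kept else kept ++ [p]) []).any f
      = (((!nl.toList.isEmpty) && f nl) || ids.any (fun t => f t.2.1)) := by
  rw [prune_any f hmono]
  rw [List.any_nil, Bool.false_or, List.any_append, List.any_map]
  cases h : nl.toList.isEmpty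
  · simp [Function.comp_def]
  · simp [Function.comp_def]

-- A's two-append fold is a filter by the disjunction of its two conditions
theorem fold_two_if_filter {α : Type} (c1 c2 c3 : α → Bool)
    (h : ∀ x, (c1 x || c2 x) = c3 x) (l : List α) :
    l.foldl (fun m x => if c1 x then m ++ [x] else if c2 x then m ++ [x] else m) [] = l.filter c3 := by
  have key : ∀ (l acc : List α),
      l.foldl (fun m x => if c1 x then m ++ [x] else if c2 x then m ++ [x] else m) acc
        = acc ++ l.filter c3 := by
    intro l
    induction l with
    | nil => intro acc; simp
    | cons x xs ih =>
      intro acc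
      simp only [List.foldl_cons, List.filter_cons, ← h x]
      by_cases h1 : c1 x = true
      · rw [if_pos h1, ih]
        simp [h1]
      · rw [if_neg h1]
        by_cases h2 : c2 x = true
        · rw [if_pos h2, ih]
          simp [h1, h2]
        · rw [if_neg h2, ih]
          simp [Bool.eq_false_iff.mpr h1, Bool.eq_false_iff.mpr h2]
  simpa using key l []

theorem match_gaps_to_disease_eq_alt (gap_issues : List (List (String × String))) (disease_ids : List (String × String × String × String)) (disease_name : String) :
    match_gaps_to_disease gap_issues disease_ids disease_name = match_gaps_to_disease_alt gap_issues disease_ids disease_name := by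
  unfold match_gaps_to_disease match_gaps_to_disease_alt
  exact fold_two_if_filter _ _ _
    (fun issue =>
      (patterns_any
        (fun q => PySem.Str.isIn q (PySem.Str.lower (PySem.Dict.getD (PySem.Dict.mk issue) "body" "")) ||
                  PySem.Str.isIn q (PySem.Str.lower (PySem.Dict.getD (PySem.Dict.mk issue) "title" "")))
        (fun q p hqp hp => hit_mono _ _ q p hqp hp)
        (PySem.Str.lower disease_name) disease_ids).symm)
    gap_issues

-- ===== VERDICT (by name: the statement is the Claim_ definition above) =====
theorem match_gaps_to_disease_spec : Claim_equal_match_gaps_to_disease := by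
  intro gap_issues disease_ids disease_name _
  exact match_gaps_to_disease_eq_alt gap_issues disease_ids disease_name
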